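-- pv_equiv track=rewrite | github.com/PPavlidis7/Aida-Web-Data-Analytics | hw_03/shared_functions.py | __calculate_tp_tn_fn_fp
-- ===== SOURCE A (Python) =====
-- def __calculate_tp_tn_fn_fp(ground_truth, results):
--     # calculate tp, tn, fn and fp base on 23th slide from 4th lecture
--     # every node that has not placed to a community is counted as fn
--     fn = len({node_id for node_id in ground_truth if node_id not in results})
--     tp, tn, fp = 0, 0, 0
--     # a set to be sure that each pair is checked only once
--     already_checked = set()
--     for node_id, __community in ground_truth.items():
--         if node_id not in results:
--             continue
--         for second_node_id, second_community in ground_truth.items():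
--             if second_node_id not in results:
--                 continue
--             if second_node_id != node_id and (node_id, second_node_id) not in already_checked and \
--                     (second_node_id, node_id) not in already_checked:
--                 already_checked.add((node_id, second_node_id))
--                 if __community != second_community:  # if nodes are not similar
--                     if results[node_id] == results[second_node_id]:  # if nodes are assigned to same community
--                         fp += 1
--                     else:
--                         tn += 1
--                 else:  # if nodes are similar
--                     if results[node_id] == results[second_node_id]:  # if nodes are assigned to same community
--                         tp += 1
--                     else:
--                         fn += 1
--     return tp, tn, fn, fp
-- ===== SOURCE B (Python) =====
-- def __calculate_tp_tn_fn_fp(ground_truth, results):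
--     # One linear pass: maintain contingency counters (gt-community, result-community),
--     # per-gt-community and per-result-community sizes; each new node contributes the
--     # number of earlier agreeing nodes, so pair counts accumulate in O(N).
--     tp = same_gt = same_res = n = missing = 0
--     cell, row, col = {}, {}, {}
--     for node, g in ground_truth.items():
--         if node not in results:
--             missing += 1
--             continue
--         r = results[node]
--         tp += cell.get((g, r), 0)
--         same_gt += row.get(g, 0)
--         same_res += col.get(r, 0)
--         n += 1
--         cell[(g, r)] = cell.get((g, r), 0) + 1
--         row[g] = row.get(g, 0) + 1
--         col[r] = col.get(r, 0) + 1
--     fp = same_res - tp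
--     fn_pairs = same_gt - tp
--     tn = n * (n - 1) // 2 - tp - fn_pairs - fp
--     return tp, tn, missing + fn_pairs, fp
-- ===== Notes on version B (the rewrite author's own statement) =====
-- stated objective: faster
-- what changed: Replaces A's O(N^2) double loop over all key pairs (with an already-checked pair set) by a single O(N) pass that maintains contingency counters (per (gt,result) community pair, per gt community, per result community) and derives tp/tn/fn/fp from pairwise-agreement counts.
import Mathlib
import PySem

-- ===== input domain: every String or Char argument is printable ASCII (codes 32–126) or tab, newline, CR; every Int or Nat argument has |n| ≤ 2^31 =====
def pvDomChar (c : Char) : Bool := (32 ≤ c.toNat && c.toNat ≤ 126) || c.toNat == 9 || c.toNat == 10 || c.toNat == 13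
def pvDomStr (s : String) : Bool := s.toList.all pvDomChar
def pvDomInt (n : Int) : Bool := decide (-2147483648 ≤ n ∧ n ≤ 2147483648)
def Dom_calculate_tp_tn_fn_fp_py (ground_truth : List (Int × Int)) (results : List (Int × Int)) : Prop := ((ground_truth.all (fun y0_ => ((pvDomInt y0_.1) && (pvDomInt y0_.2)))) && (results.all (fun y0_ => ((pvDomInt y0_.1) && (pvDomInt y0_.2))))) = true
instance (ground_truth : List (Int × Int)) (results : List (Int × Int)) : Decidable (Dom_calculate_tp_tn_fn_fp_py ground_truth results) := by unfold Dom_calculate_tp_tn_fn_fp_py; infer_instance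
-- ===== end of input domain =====

-- B replaces A's O(N^2) pairwise double loop with one O(N) pass over ground_truth that
-- maintains contingency counters; return-value equivalence is proved on dict inputs
-- (association lists with duplicate-free ground-truth keys, see Pre_).

-- ===== PORT A =====
-- inner loop body of A's nested 'for second_node_id, second_community in ground_truth.items()'
def pvAInner (rd : PySem.Dict Int Int) (p : Int × Int)
    (st : (Int × Int × Int × Int) × PySem.Set (Int × Int)) (q : Int × Int) :
    (Int × Int × Int × Int) × PySem.Set (Int × Int) :=
  if !(rd.contains q.1) then st      -- 'if second_node_id not in results: continue'
  else
    match st with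
    | ((tp, tn, fn, fp), ac) =>
      if q.1 != p.1 && !(PySem.Set.contains ac (p.1, q.1)) && !(PySem.Set.contains ac (q.1, p.1)) then
        let ac2 := PySem.Set.add ac (p.1, q.1)
        -- results[node_id] == results[second_node_id]: both keys are present here, so getD is exact
        if p.2 != q.2 then
          if rd.getD p.1 0 == rd.getD q.1 0 then ((tp, tn, fn, fp + 1), ac2)
          else ((tp, tn + 1, fn, fp), ac2)
        else
          if rd.getD p.1 0 == rd.getD q.1 0 then ((tp + 1, tn, fn, fp), ac2)
          else ((tp, tn, fn + 1, fp), ac2)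
      else ((tp, tn, fn, fp), ac)

-- outer loop body of A ('for node_id, __community in ground_truth.items()')
def pvAOuter (rd : PySem.Dict Int Int) (gt : List (Int × Int))
    (st : (Int × Int × Int × Int) × PySem.Set (Int × Int)) (p : Int × Int) :
    (Int × Int × Int × Int) × PySem.Set (Int × Int) :=
  if !(rd.contains p.1) then st      -- 'if node_id not in results: continue'
  else gt.foldl (pvAInner rd p) st

def calculate_tp_tn_fn_fp_py (ground_truth : List (Int × Int)) (results : List (Int × Int)) : Int × Int × Int × Int :=
  let rd : PySem.Dict Int Int := PySem.Dict.mk results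
  -- fn = len({node_id for node_id in ground_truth if node_id not in results})
  let fn0 : Int := PySem.Set.len (PySem.Set.ofList ((ground_truth.map Prod.fst).filter (fun k => !(rd.contains k))))
  (ground_truth.foldl (pvAOuter rd ground_truth) ((0, 0, fn0, 0), PySem.Set.empty)).1

-- ===== PORT B =====
-- loop body of B's single pass (state: tp, same_gt, same_res, n, missing, cell, row, col)
def pvBStep (rd : PySem.Dict Int Int)
    (st : Int × Int × Int × Int × Int × PySem.Dict (Int × Int) Int × PySem.Dict Int Int × PySem.Dict Int Int)
    (p : Int × Int) :
    Int × Int × Int × Int × Int × PySem.Dict (Int × Int) Int × PySem.Dict Int Int × PySem.Dict Int Int :=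
  match st with
  | (tp, sg, sr, n, miss, cell, row, col) =>
    match rd.get? p.1 with
    | none => (tp, sg, sr, n, miss + 1, cell, row, col)     -- 'if node not in results: missing += 1; continue'
    | some r =>
      (tp + cell.getD (p.2, r) 0, sg + row.getD p.2 0, sr + col.getD r 0, n + 1, miss,
       cell.insert (p.2, r) (cell.getD (p.2, r) 0 + 1),
       row.insert p.2 (row.getD p.2 0 + 1),
       col.insert r (col.getD r 0 + 1))

def calculate_tp_tn_fn_fp_py_alt (ground_truth : List (Int × Int)) (results : List (Int × Int)) : Int × Int × Int × Int :=
  let rd : PySem.Dict Int Int := PySem.Dict.mk results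
  match ground_truth.foldl (pvBStep rd) (0, 0, 0, 0, 0, PySem.Dict.empty, PySem.Dict.empty, PySem.Dict.empty) with
  | (tp, sg, sr, n, miss, _, _, _) =>
    let fp := sr - tp
    let fnp := sg - tp
    let tn := PySem.Int.floordiv (n * (n - 1)) 2 - tp - fnp - fp
    (tp, tn, miss + fnp, fp)

-- ===== PRECONDITION & SPEC =====
-- Pre_ excludes association lists whose ground-truth keys contain duplicates: those do not
-- represent a Python dict (dict keys are unique), so A's by-key pair deduplication is
-- meaningless on them.
def Pre_calculate_tp_tn_fn_fp_py (ground_truth : List (Int × Int)) (results : List (Int × Int)) : Prop :=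
  (ground_truth.map Prod.fst).Nodup
instance (ground_truth : List (Int × Int)) (results : List (Int × Int)) : Decidable (Pre_calculate_tp_tn_fn_fp_py ground_truth results) := by unfold Pre_calculate_tp_tn_fn_fp_py; infer_instance
def pvWitness_calculate_tp_tn_fn_fp_py : (List (Int × Int)) × (List (Int × Int)) :=
  ([(1, 10), (2, 10), (3, 20)], [(1, 5), (2, 5), (3, 5)])

def Spec_calculate_tp_tn_fn_fp_py (ground_truth : List (Int × Int)) (results : List (Int × Int)) (out : Int × Int × Int × Int) : Prop := out = calculate_tp_tn_fn_fp_py_alt ground_truth results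
instance (ground_truth : List (Int × Int)) (results : List (Int × Int)) (out : Int × Int × Int × Int) : Decidable (Spec_calculate_tp_tn_fn_fp_py ground_truth results out) := by unfold Spec_calculate_tp_tn_fn_fp_py; infer_instance

-- ===== CLAIM (what is proved, stated in full; the proofs are below) =====
def Claim_equal_calculate_tp_tn_fn_fp_py : Prop := ∀ (ground_truth : List (Int × Int)) (results : List (Int × Int)), Dom_calculate_tp_tn_fn_fp_py ground_truth results → Pre_calculate_tp_tn_fn_fp_py ground_truth results → Spec_calculate_tp_tn_fn_fp_py ground_truth results (calculate_tp_tn_fn_fp_py ground_truth results)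

-- ===== LEMMAS AND PROOFS =====

-- the (ground-truth community, result community) pair of an entry whose key is in results
def pvM (rd : PySem.Dict Int Int) (p : Int × Int) : Int × Int := (p.2, rd.getD p.1 0)

-- entries of gt whose key is present in results
def pvLE (rd : PySem.Dict Int Int) (gt : List (Int × Int)) : List (Int × Int) :=
  gt.filter (fun q => rd.contains q.1)

-- number of unordered pairs {i < j} of l with f l[i] l[j]
def pvCC (f : (Int × Int) → (Int × Int) → Bool) : List (Int × Int) → Nat
  | [] => 0
  | x :: xs => xs.countP (f x) + pvCC f xs

def pvPEq (x y : Int × Int) : Bool := x.1 == y.1 && x.2 == y.2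
def pvPFN (x y : Int × Int) : Bool := x.1 == y.1 && !(x.2 == y.2)
def pvPFP (x y : Int × Int) : Bool := !(x.1 == y.1) && x.2 == y.2
def pvPTN (x y : Int × Int) : Bool := !(x.1 == y.1) && !(x.2 == y.2)

lemma pvCC_congr (f g : (Int × Int) → (Int × Int) → Bool) (l : List (Int × Int))
    (h : ∀ x y, f x y = g x y) : pvCC f l = pvCC g l := by
  induction l with
  | nil => rfl
  | cons x xs ih =>
    simp only [pvCC, ih]
    congr 1
    exact List.countP_congr (fun y _ => by rw [h])

lemma countP_and_split (l : List (Int × Int)) (p q : (Int × Int) → Bool) :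
    l.countP p = l.countP (fun a => p a && q a) + l.countP (fun a => p a && !(q a)) := by
  induction l with
  | nil => rfl
  | cons x xs ih =>
    simp only [List.countP_cons, ih]
    cases hp : p x <;> cases hq : q x <;> simp [hp, hq] <;> omega

lemma pvCC_split (f g : (Int × Int) → (Int × Int) → Bool) (l : List (Int × Int)) :
    pvCC f l = pvCC (fun a b => f a b && g a b) l + pvCC (fun a b => f a b && !(g a b)) l := by
  induction l with
  | nil => rfl
  | cons x xs ih =>
    simp only [pvCC, ih]
    have := countP_and_split xs (f x) (g x)
    omega

lemma pvCC_append_singleton (f : (Int × Int) → (Int × Int) → Bool) (xs : List (Int × Int)) (y : Int × Int) :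
    pvCC f (xs ++ [y]) = pvCC f xs + xs.countP (fun x => f x y) := by
  induction xs with
  | nil => simp [pvCC]
  | cons x xs ih =>
    simp only [List.cons_append, pvCC, ih, List.countP_append, List.countP_cons]
    simp only [List.countP_nil]
    omega

lemma pvCC_true_double (l : List (Int × Int)) :
    ((l.length : Int)) * (l.length - 1) = 2 * pvCC (fun _ _ => true) l := by
  induction l with
  | nil => simp [pvCC]
  | cons x xs ih =>
    simp only [pvCC, List.countP_true, List.length_cons]
    push_cast at ih ⊢
    linarith [ih]

lemma pvPEq_iff (x y : Int × Int) : pvPEq x y = true ↔ x = y := by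
  cases x; cases y; simp [pvPEq, Prod.ext_iff]

-- ===== B-side characterization =====
lemma B_loop (rd : PySem.Dict Int Int) :
    ∀ (gt M0 : List (Int × Int)) (tp sg sr n miss : Int)
      (cell : PySem.Dict (Int × Int) Int) (row col : PySem.Dict Int Int),
      tp = (pvCC pvPEq M0 : Int) →
      sg = (pvCC (fun x y => x.1 == y.1) M0 : Int) →
      sr = (pvCC (fun x y => x.2 == y.2) M0 : Int) →
      n = (M0.length : Int) →
      (∀ k, cell.getD k 0 = (M0.countP (fun x => pvPEq x k) : Int)) →
      (∀ g, row.getD g 0 = (M0.countP (fun x => x.1 == g) : Int)) →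
      (∀ r, col.getD r 0 = (M0.countP (fun x => x.2 == r) : Int)) →
      ∃ cell' row' col',
        gt.foldl (pvBStep rd) (tp, sg, sr, n, miss, cell, row, col) =
        ((pvCC pvPEq (M0 ++ (pvLE rd gt).map (pvM rd)) : Int),
         (pvCC (fun x y => x.1 == y.1) (M0 ++ (pvLE rd gt).map (pvM rd)) : Int),
         (pvCC (fun x y => x.2 == y.2) (M0 ++ (pvLE rd gt).map (pvM rd)) : Int),
         ((M0 ++ (pvLE rd gt).map (pvM rd)).length : Int),
         miss + ((gt.filter (fun p => !(rd.contains p.1))).length : Int),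
         cell', row', col') := by
  intro gt
  induction gt with
  | nil =>
    intro M0 tp sg sr n miss cell row col h1 h2 h3 h4 hc hr hco
    subst h1 h2 h3 h4
    exact ⟨cell, row, col, by simp [pvLE]⟩
  | cons p gt ih =>
    intro M0 tp sg sr n miss cell row col h1 h2 h3 h4 hc hr hco
    subst h1 h2 h3 h4
    simp only [List.foldl_cons]
    cases hg : rd.get? p.1 with
    | none =>
      have hcont : rd.contains p.1 = false := by
        rw [PySem.Dict.contains_eq_isSome_get?, hg]; rfl
      have hstep : pvBStep rd ((pvCC pvPEq M0 : Int), (pvCC (fun x y => x.1 == y.1) M0 : Int),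
          (pvCC (fun x y => x.2 == y.2) M0 : Int), (M0.length : Int), miss, cell, row, col) p =
          ((pvCC pvPEq M0 : Int), (pvCC (fun x y => x.1 == y.1) M0 : Int),
          (pvCC (fun x y => x.2 == y.2) M0 : Int), (M0.length : Int), miss + 1, cell, row, col) := by
        simp [pvBStep, hg]
      rw [hstep]
      obtain ⟨c', r', co', heq⟩ := ih M0 _ _ _ _ (miss + 1) cell row col rfl rfl rfl rfl hc hr hco
      refine ⟨c', r', co', ?_⟩
      rw [heq]
      have hLE : pvLE rd (p :: gt) = pvLE rd gt := by
        simp [pvLE, List.filter_cons, hcont]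
      rw [hLE]
      simp only [List.filter_cons, hcont, Bool.not_false, if_true, List.length_cons]
      simp only [Prod.mk.injEq, true_and, and_true]
      push_cast
      ring
    | some r =>
      have hcont : rd.contains p.1 = true := by
        rw [PySem.Dict.contains_eq_isSome_get?, hg]; rfl
      have hm : pvM rd p = (p.2, r) := by
        simp [pvM, PySem.Dict.getD_of_get?_eq_some rd 0 hg]
      have hstep : pvBStep rd ((pvCC pvPEq M0 : Int), (pvCC (fun x y => x.1 == y.1) M0 : Int),
          (pvCC (fun x y => x.2 == y.2) M0 : Int), (M0.length : Int), miss, cell, row, col) p =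
          ((pvCC pvPEq M0 : Int) + cell.getD (p.2, r) 0,
           (pvCC (fun x y => x.1 == y.1) M0 : Int) + row.getD p.2 0,
           (pvCC (fun x y => x.2 == y.2) M0 : Int) + col.getD r 0,
           (M0.length : Int) + 1, miss,
           cell.insert (p.2, r) (cell.getD (p.2, r) 0 + 1),
           row.insert p.2 (row.getD p.2 0 + 1),
           col.insert r (col.getD r 0 + 1)) := by
        simp [pvBStep, hg]
      rw [hstep]
      obtain ⟨c', r', co', heq⟩ := ih (M0 ++ [(p.2, r)])
        ((pvCC pvPEq M0 : Int) + cell.getD (p.2, r) 0)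
        ((pvCC (fun x y => x.1 == y.1) M0 : Int) + row.getD p.2 0)
        ((pvCC (fun x y => x.2 == y.2) M0 : Int) + col.getD r 0)
        ((M0.length : Int) + 1) miss
        (cell.insert (p.2, r) (cell.getD (p.2, r) 0 + 1))
        (row.insert p.2 (row.getD p.2 0 + 1))
        (col.insert r (col.getD r 0 + 1))
        (by rw [pvCC_append_singleton, hc (p.2, r)]; push_cast; ring)
        (by rw [pvCC_append_singleton]
            rw [show (fun x : Int × Int => x.1 == (p.2, r).1) = (fun x : Int × Int => x.1 == p.2) from rfl]
            rw [hr p.2]; push_cast; ring)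
        (by rw [pvCC_append_singleton]
            rw [show (fun x : Int × Int => x.2 == (p.2, r).2) = (fun x : Int × Int => x.2 == r) from rfl]
            rw [hco r]; push_cast; ring)
        (by simp)
        (by
          intro k
          rw [PySem.Dict.getD_insert]
          by_cases hk : k = (p.2, r)
          · subst hk
            rw [if_pos rfl, hc]
            simp [List.countP_append, List.countP_cons, pvPEq_iff]
          · rw [if_neg hk, hc]
            have : pvPEq (p.2, r) k = false := by
              rw [Bool.eq_false_iff]
              intro hx
              exact hk ((pvPEq_iff _ _).mp hx).symm
            simp [List.countP_append, List.countP_cons, this])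
        (by
          intro g
          rw [PySem.Dict.getD_insert]
          by_cases hk : g = p.2
          · subst hk
            rw [if_pos rfl, hr]
            simp [List.countP_append, List.countP_cons]
          · rw [if_neg hk, hr]
            simp [List.countP_append, List.countP_cons, Ne.symm hk])
        (by
          intro rr
          rw [PySem.Dict.getD_insert]
          by_cases hk : rr = r
          · subst hk
            rw [if_pos rfl, hco]
            simp [List.countP_append, List.countP_cons]
          · rw [if_neg hk, hco]
            simp [List.countP_append, List.countP_cons, Ne.symm hk])
      refine ⟨c', r', co', ?_⟩
      rw [heq]
      have hLE : pvLE rd (p :: gt) = p :: pvLE rd gt := by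
        simp [pvLE, List.filter_cons, hcont]
      rw [hLE]
      simp only [List.map_cons, hm, List.filter_cons, hcont, Bool.not_true]
      simp only [List.append_assoc, List.singleton_append, if_neg (by simp : ¬ (false = true))]

-- ===== A-side machinery =====

-- the body of A's inner loop for a q already known to be in results
def pvAInner2 (rd : PySem.Dict Int Int) (p : Int × Int)
    (st : (Int × Int × Int × Int) × PySem.Set (Int × Int)) (q : Int × Int) :
    (Int × Int × Int × Int) × PySem.Set (Int × Int) :=
  match st with
  | ((tp, tn, fn, fp), ac) =>
    if q.1 != p.1 && !(PySem.Set.contains ac (p.1, q.1)) && !(PySem.Set.contains ac (q.1, p.1)) then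
      let ac2 := PySem.Set.add ac (p.1, q.1)
      if p.2 != q.2 then
        if rd.getD p.1 0 == rd.getD q.1 0 then ((tp, tn, fn, fp + 1), ac2)
        else ((tp, tn + 1, fn, fp), ac2)
      else
        if rd.getD p.1 0 == rd.getD q.1 0 then ((tp + 1, tn, fn, fp), ac2)
        else ((tp, tn, fn + 1, fp), ac2)
    else ((tp, tn, fn, fp), ac)

lemma pvAInner_guard (rd : PySem.Dict Int Int) (p : Int × Int) :
    pvAInner rd p = fun st q => if rd.contains q.1 = true then pvAInner2 rd p st q else st := by
  funext st q
  rcases st with ⟨⟨tp, tn, fn, fp⟩, ac⟩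
  cases h : rd.contains q.1 <;> simp [pvAInner, pvAInner2, h]

lemma pvAOuter_guard (rd : PySem.Dict Int Int) (gt : List (Int × Int)) :
    pvAOuter rd gt = fun st p => if rd.contains p.1 = true then gt.foldl (pvAInner rd p) st else st := by
  funext st p
  cases h : rd.contains p.1 <;> simp [pvAOuter, h]

lemma foldl_id_of {α β : Type} (f : β → α → β) (st : β) (l : List α)
    (h : ∀ q ∈ l, f st q = st) : l.foldl f st = st := by
  induction l with
  | nil => rfl
  | cons x xs ih =>
    rw [List.foldl_cons, h x (by simp)]
    exact ih (fun q hq => h q (by simp [hq]))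

def pvSym (S : PySem.Set (Int × Int)) (u v : Int) : Prop := (u, v) ∈ S ∨ (v, u) ∈ S

lemma inner_run (rd : PySem.Dict Int Int) (p : Int × Int) :
    ∀ (R : List (Int × Int)) (S : PySem.Set (Int × Int)) (tp tn fn fp : Int),
      p.1 ∉ R.map Prod.fst → (R.map Prod.fst).Nodup →
      (∀ q ∈ R, ¬ pvSym S p.1 q.1) →
      R.foldl (pvAInner2 rd p) ((tp, tn, fn, fp), S) =
        ((tp + R.countP (fun q => pvPEq (pvM rd p) (pvM rd q)),
          tn + R.countP (fun q => pvPTN (pvM rd p) (pvM rd q)),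
          fn + R.countP (fun q => pvPFN (pvM rd p) (pvM rd q)),
          fp + R.countP (fun q => pvPFP (pvM rd p) (pvM rd q))),
         S.update (R.map (fun q => (p.1, q.1)))) := by
  intro R
  induction R with
  | nil => intro S tp tn fn fp _ _ _; simp [PySem.Set.update]
  | cons q R ih =>
    intro S tp tn fn fp hp hnd hS
    have hpq : p.1 ≠ q.1 := fun h => hp (by simp [h])
    have hmem1 : (p.1, q.1) ∉ S := fun hx => hS q (by simp) (Or.inl hx)
    have hmem2 : (q.1, p.1) ∉ S := fun hx => hS q (by simp) (Or.inr hx)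
    have hqR : q.1 ∉ R.map Prod.fst := (List.nodup_cons.mp (by simpa using hnd)).1
    have hp' : p.1 ∉ R.map Prod.fst := fun hx => hp (by simp [hx])
    have hnd' : (R.map Prod.fst).Nodup := (List.nodup_cons.mp (by simpa using hnd)).2
    have hS' : ∀ q' ∈ R, ¬ pvSym (PySem.Set.add S (p.1, q.1)) p.1 q'.1 := by
      intro q' hq' hsym
      rcases hsym with h | h
      · rcases (PySem.Set.mem_add S _ _).mp h with h | h
        · exact hS q' (by simp [hq']) (Or.inl h)
        · have he : q'.1 = q.1 := by simpa using (Prod.ext_iff.mp h).2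
          exact hqR (he ▸ List.mem_map_of_mem (f := Prod.fst) hq')
      · rcases (PySem.Set.mem_add S _ _).mp h with h | h
        · exact hS q' (by simp [hq']) (Or.inr h)
        · have he : q'.1 = p.1 := by simpa using (Prod.ext_iff.mp h).1
          exact hp' (he ▸ List.mem_map_of_mem (f := Prod.fst) hq')
    simp only [List.foldl_cons]
    by_cases hg : p.2 = q.2 <;> by_cases hr : rd.getD p.1 0 = rd.getD q.1 0
    · -- same gt community, same result community: tp
      have hgb : (p.2 != q.2) = false := by simp [hg]
      have hrb : (rd.getD p.1 0 == rd.getD q.1 0) = true := by simp [hr]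
      have hstep : pvAInner2 rd p ((tp, tn, fn, fp), S) q = ((tp + 1, tn, fn, fp), PySem.Set.add S (p.1, q.1)) := by
        simp [pvAInner2, hgb, hrb]
        exact ⟨Ne.symm hpq, hmem1, hmem2⟩
      rw [hstep, ih _ _ _ _ _ hp' hnd' hS']
      simp only [List.map_cons, Prod.mk.injEq]
      refine ⟨⟨?_, ?_, ?_, ?_⟩, rfl⟩ <;>
        · simp [List.countP_cons, pvPEq, pvPTN, pvPFN, pvPFP, pvM, hg, hr] <;> omega
    · -- same gt community, different result community: fn
      have hgb : (p.2 != q.2) = false := by simp [hg]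
      have hrb : (rd.getD p.1 0 == rd.getD q.1 0) = false := by simp [hr]
      have hstep : pvAInner2 rd p ((tp, tn, fn, fp), S) q = ((tp, tn, fn + 1, fp), PySem.Set.add S (p.1, q.1)) := by
        simp [pvAInner2, hgb, hrb]
        exact ⟨Ne.symm hpq, hmem1, hmem2⟩
      rw [hstep, ih _ _ _ _ _ hp' hnd' hS']
      simp only [List.map_cons, Prod.mk.injEq]
      refine ⟨⟨?_, ?_, ?_, ?_⟩, rfl⟩ <;>
        · simp [List.countP_cons, pvPEq, pvPTN, pvPFN, pvPFP, pvM, hg, hr] <;> omega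
    · -- different gt community, same result community: fp
      have hgb : (p.2 != q.2) = true := by simp [bne_iff_ne]; exact hg
      have hrb : (rd.getD p.1 0 == rd.getD q.1 0) = true := by simp [hr]
      have hstep : pvAInner2 rd p ((tp, tn, fn, fp), S) q = ((tp, tn, fn, fp + 1), PySem.Set.add S (p.1, q.1)) := by
        simp [pvAInner2, hgb, hrb]
        exact ⟨Ne.symm hpq, hmem1, hmem2⟩
      rw [hstep, ih _ _ _ _ _ hp' hnd' hS']
      simp only [List.map_cons, Prod.mk.injEq]
      refine ⟨⟨?_, ?_, ?_, ?_⟩, rfl⟩ <;>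
        · simp [List.countP_cons, pvPEq, pvPTN, pvPFN, pvPFP, pvM, hg, hr] <;> omega
    · -- different gt community, different result community: tn
      have hgb : (p.2 != q.2) = true := by simp [bne_iff_ne]; exact hg
      have hrb : (rd.getD p.1 0 == rd.getD q.1 0) = false := by simp [hr]
      have hstep : pvAInner2 rd p ((tp, tn, fn, fp), S) q = ((tp, tn + 1, fn, fp), PySem.Set.add S (p.1, q.1)) := by
        simp [pvAInner2, hgb, hrb]
        exact ⟨Ne.symm hpq, hmem1, hmem2⟩
      rw [hstep, ih _ _ _ _ _ hp' hnd' hS']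
      simp only [List.map_cons, Prod.mk.injEq]
      refine ⟨⟨?_, ?_, ?_, ?_⟩, rfl⟩ <;>
        · simp [List.countP_cons, pvPEq, pvPTN, pvPFN, pvPFP, pvM, hg, hr] <;> omega

set_option maxHeartbeats 1000000 in
lemma A_loop (rd : PySem.Dict Int Int) :
    ∀ (R D : List (Int × Int)) (S : PySem.Set (Int × Int)) (tp tn fn fp : Int),
      (((D ++ R).map Prod.fst).Nodup) →
      (∀ u v, u ∈ (D ++ R).map Prod.fst → v ∈ (D ++ R).map Prod.fst →
        (pvSym S u v ↔ u ≠ v ∧ (u ∈ D.map Prod.fst ∨ v ∈ D.map Prod.fst))) →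
      ∃ S',
        R.foldl (fun st p => (D ++ R).foldl (pvAInner2 rd p) st) ((tp, tn, fn, fp), S) =
        ((tp + pvCC pvPEq (R.map (pvM rd)),
          tn + pvCC pvPTN (R.map (pvM rd)),
          fn + pvCC pvPFN (R.map (pvM rd)),
          fp + pvCC pvPFP (R.map (pvM rd))), S') := by
  intro R
  induction R with
  | nil =>
    intro D S tp tn fn fp _ _
    exact ⟨S, by simp [pvCC]⟩
  | cons p R ih =>
    intro D S tp tn fn fp hnd hinv
    have hkeys : (D ++ p :: R).map Prod.fst = D.map Prod.fst ++ p.1 :: R.map Prod.fst := by simp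
    have hnd' := hkeys ▸ hnd
    rcases List.nodup_append.mp hnd' with ⟨hndD, hndpR, hdisj⟩
    rcases List.nodup_cons.mp hndpR with ⟨hpR, hndR⟩
    have hpD : p.1 ∉ D.map Prod.fst := fun hx => hdisj p.1 hx p.1 (by simp) rfl
    have hmemp : p.1 ∈ (D ++ p :: R).map Prod.fst := List.mem_map_of_mem (by simp)
    have hD : D.foldl (pvAInner2 rd p) ((tp, tn, fn, fp), S) = ((tp, tn, fn, fp), S) := by
      apply foldl_id_of
      intro q hq
      have hq1 : q.1 ∈ D.map Prod.fst := List.mem_map_of_mem hq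
      by_cases hqp : q.1 = p.1
      · have hb : (q.1 != p.1) = false := by simp [hqp]
        simp [pvAInner2, hb]
      · have hsym : pvSym S p.1 q.1 := by
          refine (hinv p.1 q.1 hmemp (List.mem_map_of_mem (List.mem_append_left _ hq))).mpr ?_
          exact ⟨Ne.symm hqp, Or.inr hq1⟩
        rcases hsym with h | h
        · simp [pvAInner2, h]
        · simp [pvAInner2, h]
    have hself : pvAInner2 rd p ((tp, tn, fn, fp), S) p = ((tp, tn, fn, fp), S) := by
      simp [pvAInner2]
    have hSp : ∀ q ∈ R, ¬ pvSym S p.1 q.1 := by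
      intro q hq hsym
      have hq1 : q.1 ∈ R.map Prod.fst := List.mem_map_of_mem hq
      have hmemq : q.1 ∈ (D ++ p :: R).map Prod.fst :=
        List.mem_map_of_mem (List.mem_append_right _ (List.mem_cons_of_mem _ hq))
      have hiff := (hinv p.1 q.1 hmemp hmemq).mp hsym
      rcases hiff.2 with h | h
      · exact hpD h
      · exact hdisj q.1 h q.1 (by simp [hq1]) rfl
    have hinner1 : (D ++ p :: R).foldl (pvAInner2 rd p) ((tp, tn, fn, fp), S) =
        ((tp + (R.countP fun q => pvPEq (pvM rd p) (pvM rd q)),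
          tn + (R.countP fun q => pvPTN (pvM rd p) (pvM rd q)),
          fn + (R.countP fun q => pvPFN (pvM rd p) (pvM rd q)),
          fp + (R.countP fun q => pvPFP (pvM rd p) (pvM rd q))),
         PySem.Set.update S (R.map (fun q => (p.1, q.1)))) := by
      rw [List.foldl_append, hD, List.foldl_cons, hself,
          inner_run rd p R S tp tn fn fp hpR hndR hSp]
    have hl : D ++ p :: R = (D ++ [p]) ++ R := by simp
    have hinv' : ∀ u v, u ∈ ((D ++ [p]) ++ R).map Prod.fst → v ∈ ((D ++ [p]) ++ R).map Prod.fst →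
        (pvSym (PySem.Set.update S (R.map (fun q => (p.1, q.1)))) u v ↔
         u ≠ v ∧ (u ∈ (D ++ [p]).map Prod.fst ∨ v ∈ (D ++ [p]).map Prod.fst)) := by
      intro u v hu hv
      have hu' : u ∈ D.map Prod.fst ∨ u = p.1 ∨ u ∈ R.map Prod.fst := by
        simpa using hu
      have hv' : v ∈ D.map Prod.fst ∨ v = p.1 ∨ v ∈ R.map Prod.fst := by
        simpa using hv
      have hmemc : ∀ a b : Int, ((a, b) ∈ PySem.Set.update S (R.map (fun q => (p.1, q.1))) ↔
          (a, b) ∈ S ∨ (a = p.1 ∧ b ∈ R.map Prod.fst)) := by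
        intro a b
        rw [PySem.Set.mem_update]
        constructor
        · rintro (h | h)
          · exact Or.inl h
          · rcases List.mem_map.mp h with ⟨q, hq, hqe⟩
            have ha : a = p.1 := by simpa using (Prod.ext_iff.mp hqe).1.symm
            have hbv : b = q.1 := by simpa using (Prod.ext_iff.mp hqe).2.symm
            refine Or.inr ⟨ha, ?_⟩
            rw [hbv]
            exact List.mem_map_of_mem (f := Prod.fst) hq
        · rintro (h | ⟨h1, h2⟩)
          · exact Or.inl h
          · subst h1
            rcases List.mem_map.mp h2 with ⟨q, hq, hqe⟩
            exact Or.inr (List.mem_map.mpr ⟨q, hq, by simp [hqe]⟩)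
      have holdu : u ∈ (D ++ p :: R).map Prod.fst := by rw [hl]; exact hu
      have holdv : v ∈ (D ++ p :: R).map Prod.fst := by rw [hl]; exact hv
      have hold := hinv u v holdu holdv
      constructor
      · rintro (h | h)
        · rcases (hmemc u v).mp h with h | ⟨h1, h2⟩
          · have := hold.mp (Or.inl h)
            exact ⟨this.1, by rcases this.2 with h | h <;> simp [h]⟩
          · subst h1
            refine ⟨fun he => hpR (he ▸ h2), Or.inl (by simp)⟩
        · rcases (hmemc v u).mp h with h | ⟨h1, h2⟩
          · have := hold.mp (Or.inr h)
            exact ⟨this.1, by rcases this.2 with h | h <;> simp [h]⟩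
          · subst h1
            refine ⟨fun he => hpR (he.symm ▸ h2), Or.inr (by simp)⟩
      · rintro ⟨hne, hDor⟩
        have hsplitD : ∀ w : Int, w ∈ (D ++ [p]).map Prod.fst ↔ (w ∈ D.map Prod.fst ∨ w = p.1) := by
          intro w; simp
        have hDor' : (u ∈ D.map Prod.fst ∨ v ∈ D.map Prod.fst) ∨ u = p.1 ∨ v = p.1 := by
          rcases hDor with h | h
          · rcases (hsplitD u).mp h with h | h
            · tauto
            · tauto
          · rcases (hsplitD v).mp h with h | h
            · tauto
            · tauto
        rcases hDor' with h | h
        · rcases hold.mpr ⟨hne, h⟩ with h' | h'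
          · exact Or.inl ((hmemc u v).mpr (Or.inl h'))
          · exact Or.inr ((hmemc v u).mpr (Or.inl h'))
        · rcases h with h | h
          · subst h
            rcases hv' with hv'' | hv'' | hv''
            · rcases hold.mpr ⟨hne, Or.inr hv''⟩ with h' | h'
              · exact Or.inl ((hmemc _ _).mpr (Or.inl h'))
              · exact Or.inr ((hmemc _ _).mpr (Or.inl h'))
            · exact absurd hv''.symm hne
            · exact Or.inl ((hmemc _ _).mpr (Or.inr ⟨rfl, hv''⟩))
          · subst h
            rcases hu' with hu'' | hu'' | hu''
            · rcases hold.mpr ⟨hne, Or.inl hu''⟩ with h' | h'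
              · exact Or.inl ((hmemc _ _).mpr (Or.inl h'))
              · exact Or.inr ((hmemc _ _).mpr (Or.inl h'))
            · exact absurd hu'' hne
            · exact Or.inr ((hmemc _ _).mpr (Or.inr ⟨rfl, hu''⟩))
    obtain ⟨S', heq⟩ := ih (D ++ [p]) (PySem.Set.update S (R.map (fun q => (p.1, q.1))))
      (tp + (R.countP fun q => pvPEq (pvM rd p) (pvM rd q)))
      (tn + (R.countP fun q => pvPTN (pvM rd p) (pvM rd q)))
      (fn + (R.countP fun q => pvPFN (pvM rd p) (pvM rd q)))
      (fp + (R.countP fun q => pvPFP (pvM rd p) (pvM rd q)))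
      (by rw [← hl]; exact hnd) hinv'
    refine ⟨S', ?_⟩
    rw [List.foldl_cons, hinner1,
        show (fun (st : (Int × Int × Int × Int) × PySem.Set (Int × Int)) (p' : Int × Int) =>
          List.foldl (pvAInner2 rd p') st (D ++ p :: R)) =
          (fun st p' => List.foldl (pvAInner2 rd p') st ((D ++ [p]) ++ R)) from by rw [hl],
        heq]
    simp only [List.map_cons, pvCC, List.countP_map, Prod.mk.injEq]
    refine ⟨⟨?_, ?_, ?_, ?_⟩, trivial⟩ <;>
      · simp only [Function.comp_def]
        push_cast
        ring

-- ===== VERDICT (by name: the statement is the Claim_ definition above) =====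
set_option maxHeartbeats 1000000 in
theorem calculate_tp_tn_fn_fp_py_spec : Claim_equal_calculate_tp_tn_fn_fp_py := by
  intro gt rs _ hpre
  unfold Spec_calculate_tp_tn_fn_fp_py
  unfold Pre_calculate_tp_tn_fn_fp_py at hpre
  simp only [calculate_tp_tn_fn_fp_py, calculate_tp_tn_fn_fp_py_alt]
  set rd : PySem.Dict Int Int := PySem.Dict.mk rs with hrd
  -- ==== A side ====
  rw [pvAOuter_guard rd gt,
      PySem.List.foldl_if_eq_foldl_filter (fun p => rd.contains p.1)
        (fun st p => gt.foldl (pvAInner rd p) st) gt]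
  have hinner : ∀ (st : (Int × Int × Int × Int) × PySem.Set (Int × Int)) (p : Int × Int),
      gt.foldl (pvAInner rd p) st = (pvLE rd gt).foldl (pvAInner2 rd p) st := by
    intro st p
    rw [pvAInner_guard rd p, PySem.List.foldl_if_eq_foldl_filter (fun q => rd.contains q.1)
      (pvAInner2 rd p) gt]
    rfl
  rw [PySem.List.foldl_congr_mem _ _ (fun st p => (pvLE rd gt).foldl (pvAInner2 rd p) st) _
    (fun st p _ => hinner st p)]
  have hndL : ((pvLE rd gt).map Prod.fst).Nodup := by
    have hsub : List.Sublist ((pvLE rd gt).map Prod.fst) (gt.map Prod.fst) :=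
      List.Sublist.map Prod.fst List.filter_sublist
    exact hpre.sublist hsub
  obtain ⟨S', heqA⟩ := A_loop rd (pvLE rd gt) [] PySem.Set.empty 0 0
    (PySem.Set.len (PySem.Set.ofList ((gt.map Prod.fst).filter (fun k => !(rd.contains k))))) 0
    (by simpa using hndL)
    (by
      intro u v _ _
      constructor
      · rintro (h | h) <;> simp [PySem.Set.empty] at h
      · rintro ⟨_, h | h⟩ <;> simp at h)
  rw [show (gt.filter fun p => rd.contains p.1) = pvLE rd gt from rfl]
  rw [show (List.foldl (fun st p => List.foldl (pvAInner2 rd p) st (pvLE rd gt))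
        ((0, 0, PySem.Set.len (PySem.Set.ofList ((gt.map Prod.fst).filter (fun k => !(rd.contains k)))), 0),
          PySem.Set.empty) (pvLE rd gt)) =
      (List.foldl (fun st p => List.foldl (pvAInner2 rd p) st ([] ++ pvLE rd gt))
        ((0, 0, PySem.Set.len (PySem.Set.ofList ((gt.map Prod.fst).filter (fun k => !(rd.contains k)))), 0),
          PySem.Set.empty) (pvLE rd gt)) from by simp]
  rw [heqA]
  -- ==== B side ====
  obtain ⟨c', r', co', heqB⟩ := B_loop rd gt [] 0 0 0 0 0 PySem.Dict.empty PySem.Dict.empty PySem.Dict.empty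
    (by simp [pvCC]) (by simp [pvCC]) (by simp [pvCC]) (by simp)
    (by intro k; simp [PySem.Dict.getD_empty])
    (by intro g; simp [PySem.Dict.getD_empty])
    (by intro r; simp [PySem.Dict.getD_empty])
  rw [heqB]
  -- ==== arithmetic on the pair counts ====
  set M : List (Int × Int) := (pvLE rd gt).map (pvM rd) with hM
  have hfn0 : PySem.Set.len (PySem.Set.ofList ((gt.map Prod.fst).filter (fun k => !(rd.contains k)))) =
      ((gt.filter (fun p => !(rd.contains p.1))).length : Int) := by
    have hnodup : ((gt.map Prod.fst).filter (fun k => !(rd.contains k))).Nodup := hpre.filter _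
    have hcomp : ((fun k => !(rd.contains k)) ∘ Prod.fst) = (fun p : Int × Int => !(rd.contains p.1)) := rfl
    rw [PySem.Set.ofList_eq_self_of_nodup _ hnodup, List.filter_map, hcomp]
    simp [pysem, PySem.Set.len, List.length_map]
  have hsplitG : pvCC (fun x y => x.1 == y.1) M = pvCC pvPEq M + pvCC pvPFN M := by
    have h := pvCC_split (fun x y : Int × Int => x.1 == y.1) (fun x y => x.2 == y.2) M
    have e1 : pvCC (fun a b : Int × Int => (a.1 == b.1) && (a.2 == b.2)) M = pvCC pvPEq M :=
      pvCC_congr _ _ _ (fun x y => rfl)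
    have e2 : pvCC (fun a b : Int × Int => (a.1 == b.1) && !(a.2 == b.2)) M = pvCC pvPFN M :=
      pvCC_congr _ _ _ (fun x y => rfl)
    omega
  have hsplitR : pvCC (fun x y => x.2 == y.2) M = pvCC pvPEq M + pvCC pvPFP M := by
    have h := pvCC_split (fun x y : Int × Int => x.2 == y.2) (fun x y => x.1 == y.1) M
    have e1 : pvCC (fun a b : Int × Int => (a.2 == b.2) && (a.1 == b.1)) M = pvCC pvPEq M :=
      pvCC_congr _ _ _ (fun x y => Bool.and_comm _ _)
    have e2 : pvCC (fun a b : Int × Int => (a.2 == b.2) && !(a.1 == b.1)) M = pvCC pvPFP M :=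
      pvCC_congr _ _ _ (fun x y => Bool.and_comm _ _)
    omega
  have hsplitT : pvCC (fun _ _ => true) M =
      pvCC (fun x y => x.1 == y.1) M + (pvCC pvPFP M + pvCC pvPTN M) := by
    have h1 := pvCC_split (fun _ _ : Int × Int => true) (fun x y => x.1 == y.1) M
    have h2 := pvCC_split (fun a b : Int × Int => true && !(a.1 == b.1)) (fun x y => x.2 == y.2) M
    have e1 : pvCC (fun a b : Int × Int => true && (a.1 == b.1)) M =
        pvCC (fun x y : Int × Int => x.1 == y.1) M :=
      pvCC_congr _ _ _ (fun x y => by simp)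
    have e2 : pvCC (fun a b : Int × Int => (true && !(a.1 == b.1)) && (a.2 == b.2)) M =
        pvCC pvPFP M :=
      pvCC_congr _ _ _ (fun x y => by simp [pvPFP])
    have e3 : pvCC (fun a b : Int × Int => (true && !(a.1 == b.1)) && !(a.2 == b.2)) M =
        pvCC pvPTN M :=
      pvCC_congr _ _ _ (fun x y => by simp [pvPTN])
    omega
  have hdiv : PySem.Int.floordiv ((M.length : Int) * ((M.length : Int) - 1)) 2 =
      (pvCC (fun _ _ => true) M : Int) := by
    rw [pvCC_true_double M, PySem.Int.floordiv_eq_ediv_of_pos (by norm_num)]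
    exact Int.mul_ediv_cancel_left _ (by norm_num)
  simp only [List.nil_append, Prod.mk.injEq]
  refine ⟨by push_cast; ring, ?_, ?_, ?_⟩
  · rw [hdiv]
    push_cast [hsplitT, hsplitG, hsplitR]
    ring
  · rw [hfn0]
    push_cast [hsplitG]
    ring
  · push_cast [hsplitR]
    ring
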